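-- pv_equiv track=rewrite | github.com/avishek376/Scaler-Problem-Solving | Intermediate/Intermediate DSA: Arrays - Carry Forward/Assignment/Q4. Closest MinMax/Closest MinMax.py | solve
-- ===== SOURCE A (Python) =====
-- def solve(A):
--     mini = maxi = -1
--     n = len(A)
--     result = n
--     minv = min(A)
--     maxv = max(A)
--     for i in range(n - 1, -1, -1):
--         if A[i] == minv:
--             mini = i
--             if maxi != -1:
--                 result = min(result, maxi - mini + 1)
--         if A[i] == maxv:
--             maxi = i
--             if mini != -1:
--                 result = min(result, mini - maxi + 1)
--     return result
-- ===== SOURCE B (Python) =====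
-- def solve(A):
--     minv = min(A)
--     maxv = max(A)
--     mins = [i for i, x in enumerate(A) if x == minv]
--     maxs = [i for i, x in enumerate(A) if x == maxv]
--     best = len(A)
--     p = q = 0
--     while p < len(mins) and q < len(maxs):
--         best = min(best, abs(mins[p] - maxs[q]) + 1)
--         if mins[p] < maxs[q]:
--             p += 1
--         else:
--             q += 1
--     return best
-- ===== Notes on version B (the rewrite author's own statement) =====
-- stated objective: alternative
-- what changed: A's single right-to-left carry-forward scan with last-seen min/max indices is replaced by building the sorted lists of min-value and max-value indices and running a two-pointer merge over them minimising |minIdx - maxIdx| + 1.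
import Mathlib
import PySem

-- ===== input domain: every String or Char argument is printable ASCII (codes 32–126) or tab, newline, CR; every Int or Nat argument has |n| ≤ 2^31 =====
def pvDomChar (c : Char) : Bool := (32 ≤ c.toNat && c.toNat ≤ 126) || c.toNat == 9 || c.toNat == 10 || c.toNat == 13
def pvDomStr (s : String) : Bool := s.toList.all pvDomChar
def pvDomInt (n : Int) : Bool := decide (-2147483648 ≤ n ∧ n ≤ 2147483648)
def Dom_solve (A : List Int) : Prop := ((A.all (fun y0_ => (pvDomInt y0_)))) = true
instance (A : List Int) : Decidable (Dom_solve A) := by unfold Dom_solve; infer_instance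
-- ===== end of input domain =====

-- B replaces A's single right-to-left carry-forward scan by: build the sorted lists of
-- min-value indices and max-value indices, then a two-pointer merge over the two lists
-- minimising |minIdx - maxIdx| + 1 (objective: alternative decomposition, same cost).

-- ===== PORT A =====
def solveStep (A : List Int) (minv maxv : Int) (i : Nat) (s : Int × Int × Int) : Int × Int × Int :=
  let mini := s.1
  let maxi := s.2.1
  let result := s.2.2
  let x := A.getD i 0
  let (mini, result) :=
    if x = minv then
      ((i : Int), if maxi ≠ -1 then min result (maxi - (i : Int) + 1) else result)
    else (mini, result)
  if x = maxv then
    (mini, ((i : Int), if mini ≠ -1 then min result (mini - (i : Int) + 1) else result))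
  else (mini, (maxi, result))

def solveLoop (A : List Int) (minv maxv : Int) : Nat → Int × Int × Int → Int × Int × Int
  | 0, s => s
  | (k+1), s => solveLoop A minv maxv k (solveStep A minv maxv k s)

def solve (A : List Int) : Int :=
  let n := A.length
  let minv := (PySem.List.min? A (fun x => x)).getD 0
  let maxv := (PySem.List.max? A (fun x => x)).getD 0
  (solveLoop A minv maxv n (-1, (-1, (n : Int)))).2.2

-- ===== PORT B =====
def idxOf (A : List Int) (v : Int) : List Int :=
  ((PySem.List.enumerate A).filter (fun p => p.2 == v)).map (fun p => p.1)

def twoPtr : List Int → List Int → Int → Int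
  | x::xs, y::ys, best =>
      let b' := min best (|x - y| + 1)
      if x < y then twoPtr xs (y::ys) b' else twoPtr (x::xs) ys b'
  | _, _, best => best
termination_by xs ys _ => xs.length + ys.length

def solve_alt (A : List Int) : Int :=
  let minv := (PySem.List.min? A (fun x => x)).getD 0
  let maxv := (PySem.List.max? A (fun x => x)).getD 0
  twoPtr (idxOf A minv) (idxOf A maxv) (A.length : Int)

-- ===== PRECONDITION & SPEC =====
-- Pre_ excludes only the empty list, on which Python's min([]) raises ValueError.
def Pre_solve (A : List Int) : Prop := A ≠ []
instance (A : List Int) : Decidable (Pre_solve A) := by unfold Pre_solve; infer_instance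
def pvWitness_solve : List Int := [3, 1, 2]

def Spec_solve (A : List Int) (out : Int) : Prop := out = solve_alt A
instance (A : List Int) (out : Int) : Decidable (Spec_solve A out) := by unfold Spec_solve; infer_instance

-- ===== CLAIM (what is proved, stated in full; the proofs are below) =====
def Claim_equal_solve : Prop := ∀ (A : List Int), Dom_solve A → Pre_solve A → Spec_solve A (solve A)

-- ===== LEMMAS AND PROOFS =====

-- min over all pairs (x,y), of |x-y|+1, folded onto b
def pm (xs ys : List Int) (b : Int) : Int :=
  (xs.flatMap (fun x => ys.map (fun y => |x - y| + 1))).foldl min b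

-- index list of occurrences of v, positions counted from s
def idxRec (v : Int) : List Int → Int → List Int
  | [], _ => []
  | x::xs, s => if x = v then s :: idxRec v xs (s+1) else idxRec v xs (s+1)

theorem idxRec_mem_ge (v : Int) (l : List Int) (s : Int) :
    ∀ x ∈ idxRec v l s, s ≤ x := by
  induction l generalizing s with
  | nil => simp [idxRec]
  | cons a l ih =>
    intro x hx
    simp only [idxRec] at hx
    split at hx
    · rcases List.mem_cons.1 hx with h | h
      · omega
      · have := ih (s+1) x h; omega
    · have := ih (s+1) x hx; omega

theorem idxRec_sorted (v : Int) (l : List Int) (s : Int) :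
    (idxRec v l s).Pairwise (· ≤ ·) := by
  induction l generalizing s with
  | nil => simp [idxRec]
  | cons a l ih =>
    simp only [idxRec]
    split
    · exact List.Pairwise.cons (fun x hx => by have := idxRec_mem_ge v l (s+1) x hx; omega) (ih (s+1))
    · exact ih (s+1)

theorem idxOf_aux (v : Int) (A : List Int) : ∀ (s : Int),
    (((PySem.List.enumerate A s).filter (fun p => p.2 == v)).map (fun p => p.1)) = idxRec v A s := by
  induction A with
  | nil => intro s; simp [PySem.List.enumerate_nil, idxRec]
  | cons x xs ih =>
    intro s
    simp only [PySem.List.enumerate_cons, List.filter_cons, idxRec]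
    by_cases hx : x = v
    · simp [hx, ih (s+1)]
    · simp [hx, ih (s+1)]

theorem idxOf_eq_idxRec (A : List Int) (v : Int) : idxOf A v = idxRec v A 0 := by
  unfold idxOf
  exact idxOf_aux v A 0

-- fold-min algebra
theorem foldl_min_init (l : List Int) (a c : Int) :
    l.foldl min (min a c) = min (l.foldl min a) c := by
  induction l generalizing a with
  | nil => simp
  | cons x l ih =>
    simp only [List.foldl]
    rw [show min (min a c) x = min (min a x) c by omega, ih]

theorem foldl_min_absorb (l : List Int) (c : Int) (h : ∀ u ∈ l, c ≤ u) :
    ∀ b, b ≤ c → l.foldl min b = b := by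
  induction l with
  | nil => intro b _; simp
  | cons x l ih =>
    intro b hb
    have hx : c ≤ x := h x (by simp)
    simp only [List.foldl]
    rw [show min b x = b by omega]
    exact ih (fun u hu => h u (by simp [hu])) b hb

theorem pm_nil_left (ys : List Int) (b : Int) : pm [] ys b = b := by
  simp [pm]

theorem pm_nil_right (xs : List Int) (b : Int) : pm xs [] b = b := by
  induction xs with
  | nil => simp [pm]
  | cons x xs ih => simpa [pm, List.flatMap_cons] using ih

theorem pm_cons (x : Int) (xs ys : List Int) (b : Int) :
    pm (x::xs) ys b = pm xs ys ((ys.map (fun y => |x - y| + 1)).foldl min b) := by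
  simp [pm, List.foldl_append]

theorem map_append_flatMap_perm {α β : Type} (f : α → β) (h : α → List β) (ys : List α) :
    (ys.map f ++ ys.flatMap h).Perm (ys.flatMap (fun y => f y :: h y)) := by
  induction ys with
  | nil => simp
  | cons y ys ih =>
    simp only [List.map_cons, List.flatMap_cons, List.cons_append]
    refine List.Perm.cons (f y) ?_
    have step1 : (ys.map f ++ (h y ++ ys.flatMap h)).Perm (h y ++ (ys.map f ++ ys.flatMap h)) := by
      rw [← List.append_assoc, ← List.append_assoc]
      exact (List.perm_append_comm).append_right _
    exact step1.trans (List.Perm.append_left _ ih)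

theorem flatMap_transpose_perm {α β γ : Type} (g : α → β → γ) : ∀ (xs : List α) (ys : List β),
    (xs.flatMap (fun x => ys.map (g x))).Perm (ys.flatMap (fun y => xs.map (fun x => g x y))) := by
  intro xs
  induction xs with
  | nil => intro ys; simp
  | cons x xs ih =>
    intro ys
    simp only [List.flatMap_cons, List.map_cons]
    exact (List.Perm.append_left _ (ih ys)).trans (map_append_flatMap_perm (g x) _ ys)

theorem pm_swap (xs ys : List Int) (b : Int) : pm xs ys b = pm ys xs b := by
  unfold pm
  have hperm := flatMap_transpose_perm (fun x y => |x - y| + 1) xs ys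
  rw [hperm.foldl_eq]
  have h3 : (fun (y : Int) => xs.map (fun x => |x - y| + 1))
          = (fun (y : Int) => xs.map (fun x => |y - x| + 1)) := by
    funext y
    exact congrArg (fun f => List.map f xs) (funext fun x => by rw [abs_sub_comm])
  rw [h3]

-- row minimum under sortedness
theorem row_min (x y : Int) (ys : List Int) (b : Int)
    (hy : ∀ y' ∈ ys, y ≤ y') (hxy : x ≤ y) :
    ((y::ys).map (fun y' => |x - y'| + 1)).foldl min b = min b (y - x + 1) := by
  simp only [List.map, List.foldl]
  rw [abs_sub_comm, abs_of_nonneg (by omega : (0:Int) ≤ y - x)]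
  exact foldl_min_absorb _ (y - x + 1)
    (by intro u hu
        simp only [List.mem_map] at hu
        obtain ⟨y', hy', rfl⟩ := hu
        have h1 := hy y' hy'
        rw [abs_sub_comm, abs_of_nonneg (by omega : (0:Int) ≤ y' - x)]
        omega) _ (by omega)

theorem pm_init (xs ys : List Int) (a c : Int) :
    pm xs ys (min a c) = min (pm xs ys a) c := by
  unfold pm; exact foldl_min_init _ a c

theorem pm_cons_head (c y0 : Int) (xs ys : List Int) (b : Int)
    (h0 : ∀ y ∈ ys, y0 ≤ y) (hc : c ≤ y0) :
    pm (c::xs) (y0::ys) b = pm xs (y0::ys) (min b (y0 - c + 1)) := by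
  rw [pm_cons, row_min c y0 ys b h0 hc]

theorem pm_head_col (c x0 : Int) (xs ys : List Int) (b : Int)
    (h0 : ∀ x ∈ xs, x0 ≤ x) (hc : c ≤ x0) :
    pm (x0::xs) (c::ys) b = pm (x0::xs) ys (min b (x0 - c + 1)) := by
  rw [pm_swap, pm_cons_head c x0 ys xs b h0 hc, pm_swap]

theorem twoPtr_eq_aux : ∀ (n : Nat) (xs ys : List Int) (b : Int),
    xs.length + ys.length ≤ n →
    xs.Pairwise (· ≤ ·) → ys.Pairwise (· ≤ ·) →
    twoPtr xs ys b = pm xs ys b := by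
  intro n
  induction n with
  | zero =>
    intro xs ys b hlen _ _
    have hx : xs = [] := by cases xs <;> simp_all
    have hy : ys = [] := by cases ys <;> simp_all
    subst hx; subst hy
    simp [twoPtr, pm]
  | succ n ih =>
    intro xs ys b hlen hx hy
    match xs, ys with
    | [], ys => simp [twoPtr, pm_nil_left]
    | x::xs, [] => simp [twoPtr, pm_nil_right]
    | x::xs, y::ys =>
      rw [twoPtr]
      obtain ⟨hx1, hx2⟩ := List.pairwise_cons.1 hx
      obtain ⟨hy1, hy2⟩ := List.pairwise_cons.1 hy
      by_cases hlt : x < y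
      · rw [if_pos hlt]
        rw [ih xs (y::ys) _ (by simp at hlen ⊢; omega) hx2 hy]
        rw [pm_cons_head x y xs ys b hy1 (le_of_lt hlt)]
        rw [abs_sub_comm, abs_of_nonneg (by omega : (0:Int) ≤ y - x)]
      · rw [if_neg hlt]
        rw [ih (x::xs) ys _ (by simp at hlen ⊢; omega) hx hy2]
        rw [pm_head_col y x xs ys b hx1 (by omega)]
        rw [abs_of_nonneg (by omega : (0:Int) ≤ x - y)]

theorem twoPtr_eq (xs ys : List Int) (b : Int)
    (hx : xs.Pairwise (· ≤ ·)) (hy : ys.Pairwise (· ≤ ·)) :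
    twoPtr xs ys b = pm xs ys b :=
  twoPtr_eq_aux (xs.length + ys.length) xs ys b le_rfl hx hy

-- A-side loop invariant
theorem drop_cons_getD (A : List Int) (k : Nat) (h : k < A.length) :
    A.drop k = A.getD k 0 :: A.drop (k+1) := by
  rw [List.getD_eq_getElem A 0 h]
  exact List.drop_eq_getElem_cons h

def stFun (A : List Int) (minv maxv : Int) (k : Nat) : Int × Int × Int :=
  ((idxRec minv (A.drop k) k).headD (-1),
   ((idxRec maxv (A.drop k) k).headD (-1),
    pm (idxRec minv (A.drop k) k) (idxRec maxv (A.drop k) k) (A.length : Int)))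

theorem step_correct (A : List Int) (minv maxv : Int) (k : Nat) (hk : k < A.length) :
    solveStep A minv maxv k (stFun A minv maxv (k+1)) = stFun A minv maxv k := by
  have hdrop := drop_cons_getD A k hk
  have hcast : ((k+1 : Nat) : Int) = (k : Int) + 1 := by push_cast; ring
  -- abbreviations for the tail index lists
  have hM : idxRec minv (A.drop k) (k : Int)
      = if A.getD k 0 = minv then ((k : Int)) :: idxRec minv (A.drop (k+1)) ((k : Int)+1)
        else idxRec minv (A.drop (k+1)) ((k : Int)+1) := by
    rw [hdrop]; simp [idxRec]
  have hX : idxRec maxv (A.drop k) (k : Int)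
      = if A.getD k 0 = maxv then ((k : Int)) :: idxRec maxv (A.drop (k+1)) ((k : Int)+1)
        else idxRec maxv (A.drop (k+1)) ((k : Int)+1) := by
    rw [hdrop]; simp [idxRec]
  have hLge := idxRec_mem_ge minv (A.drop (k+1)) ((k : Int)+1)
  have hRge := idxRec_mem_ge maxv (A.drop (k+1)) ((k : Int)+1)
  have hLs := idxRec_sorted minv (A.drop (k+1)) ((k : Int)+1)
  have hRs := idxRec_sorted maxv (A.drop (k+1)) ((k : Int)+1)
  have hn : (k : Int) < (A.length : Int) := by exact_mod_cast hk
  unfold stFun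
  rw [hcast, hM, hX]
  by_cases hmin : A.getD k 0 = minv
  · by_cases hmax : A.getD k 0 = maxv
    · -- both min and max occur at k (minv = maxv)
      have hmm : minv = maxv := by rw [← hmin, hmax]
      subst hmm
      simp only [solveStep, if_pos hmin]
      rcases hLe : idxRec minv (A.drop (k+1)) ((k : Int)+1) with _ | ⟨i, L'⟩
      · rw [pm_cons_head (k : Int) (k : Int) [] [] _ (by simp) le_rfl]
        simp only [pm_nil_left, pm_nil_right]
        refine Prod.ext ?_ (Prod.ext ?_ ?_) <;> simp only [List.headD] <;> split_ifs <;> omega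
      · have hi : ((k : Int)+1) ≤ i := hLge i (by rw [hLe]; simp)
        have hiL : ∀ x ∈ L', i ≤ x := (List.pairwise_cons.1 (hLe ▸ hLs)).1
        rw [pm_cons_head (k : Int) (k : Int) (i::L') (i::L') _
              (by intro y hy
                  rcases List.mem_cons.1 hy with rfl | hy'
                  · omega
                  · have := hiL y hy'; omega) le_rfl,
            pm_head_col (k : Int) i L' (i::L') _ hiL (by omega),
            pm_init, pm_init]
        refine Prod.ext ?_ (Prod.ext ?_ ?_) <;> simp only [List.headD] <;> split_ifs <;> omega
    · -- only min at k
      simp only [solveStep, if_pos hmin, if_neg hmax]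
      rcases hRe : idxRec maxv (A.drop (k+1)) ((k : Int)+1) with _ | ⟨j, R'⟩
      · simp only [pm_nil_right]
        refine Prod.ext ?_ (Prod.ext ?_ ?_) <;> simp only [List.headD] <;> split_ifs <;> omega
      · have hj : ((k : Int)+1) ≤ j := hRge j (by rw [hRe]; simp)
        have hjR : ∀ y ∈ R', j ≤ y := (List.pairwise_cons.1 (hRe ▸ hRs)).1
        rw [pm_cons_head (k : Int) j _ R' _ hjR (by omega), pm_init]
        refine Prod.ext ?_ (Prod.ext ?_ ?_) <;> simp only [List.headD] <;> split_ifs <;> omega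
  · by_cases hmax : A.getD k 0 = maxv
    · -- only max at k
      simp only [solveStep, if_neg hmin, if_pos hmax]
      rcases hLe : idxRec minv (A.drop (k+1)) ((k : Int)+1) with _ | ⟨i, L'⟩
      · simp only [pm_nil_left]
        refine Prod.ext ?_ (Prod.ext ?_ ?_) <;> simp only [List.headD] <;> split_ifs <;> omega
      · have hi : ((k : Int)+1) ≤ i := hLge i (by rw [hLe]; simp)
        have hiL : ∀ x ∈ L', i ≤ x := (List.pairwise_cons.1 (hLe ▸ hLs)).1
        rw [pm_head_col (k : Int) i L' _ _ hiL (by omega), pm_init]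
        refine Prod.ext ?_ (Prod.ext ?_ ?_) <;> simp only [List.headD] <;> split_ifs <;> omega
    · -- neither
      simp only [solveStep, if_neg hmin, if_neg hmax]

theorem loop_inv (A : List Int) (minv maxv : Int) : ∀ (k : Nat), k ≤ A.length →
    solveLoop A minv maxv k (stFun A minv maxv k) = stFun A minv maxv 0 := by
  intro k
  induction k with
  | zero => intro _; rfl
  | succ k ih =>
    intro hk
    show solveLoop A minv maxv k (solveStep A minv maxv k (stFun A minv maxv (k+1))) = _
    rw [step_correct A minv maxv k (by omega)]
    exact ih (by omega)

-- ===== VERDICT (by name: the statement is the Claim_ definition above) =====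
theorem solve_spec : Claim_equal_solve := by
  intro A _ _
  show solve A = solve_alt A
  simp only [solve, solve_alt]
  have hst : ((-1 : Int), ((-1 : Int), (A.length : Int))) = stFun A ((PySem.List.min? A (fun x => x)).getD 0) ((PySem.List.max? A (fun x => x)).getD 0) A.length := by
    unfold stFun
    simp [List.drop_length, idxRec, pm_nil_left]
  rw [hst, loop_inv _ _ _ A.length le_rfl]
  unfold stFun
  simp only [List.drop_zero]
  rw [idxOf_eq_idxRec, idxOf_eq_idxRec,
      twoPtr_eq _ _ _ (idxRec_sorted _ A 0) (idxRec_sorted _ A 0)]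
  norm_num
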